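-- pv_equiv track=rewrite | github.com/tolldog/khonliang-geneology-example | genealogy_agent/gedcom_parser.py | _split_records
-- ===== SOURCE A (Python) =====
-- from typing import Any, Dict, List, Optional
--
-- def _split_records(lines: List[str]) -> List[List[str]]:
--     """Split GEDCOM lines into level-0 records."""
--     records: List[List[str]] = []
--     current: List[str] = []
--     for line in lines:
--         line = line.strip()
--         if not line:
--             continue
--         if line.startswith("0 "):
--             if current:
--                 records.append(current)
--             current = [line]
--         else:
--             current.append(line)
--     if current:
--         records.append(current)
--     return records
-- ===== SOURCE B (Python) =====
-- from typing import List
--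
--
-- def _split_records(lines: List[str]) -> List[List[str]]:
--     """Split GEDCOM lines into level-0 records (clean first, then chunk)."""
--     cleaned = [s for s in map(str.strip, lines) if s]
--     records: List[List[str]] = []
--     rest = cleaned
--     while rest:
--         head, tail = rest[0], rest[1:]
--         k = 0
--         while k < len(tail) and not tail[k].startswith("0 "):
--             k += 1
--         records.append([head] + tail[:k])
--         rest = tail[k:]
--     return records
-- ===== Notes on version B (the rewrite author's own statement) =====
-- stated objective: alternative
-- what changed: A interleaves stripping, blank-skipping and record accumulation in one stateful loop with a current buffer and a final flush; B first builds the cleaned line list, then chunks it by scanning ahead to the next '0 '-header and slicing, with no accumulator state or flush step.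
import Mathlib
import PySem

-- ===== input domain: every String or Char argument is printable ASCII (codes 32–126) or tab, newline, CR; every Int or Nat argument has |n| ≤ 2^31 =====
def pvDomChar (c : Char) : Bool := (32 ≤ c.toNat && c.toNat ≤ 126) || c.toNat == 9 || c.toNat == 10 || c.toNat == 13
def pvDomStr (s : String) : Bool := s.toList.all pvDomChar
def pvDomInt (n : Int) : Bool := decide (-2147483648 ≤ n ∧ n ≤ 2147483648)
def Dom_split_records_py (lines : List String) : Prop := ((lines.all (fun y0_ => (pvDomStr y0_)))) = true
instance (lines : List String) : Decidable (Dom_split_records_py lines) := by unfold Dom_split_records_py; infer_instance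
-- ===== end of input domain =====

-- B cleans the lines first and then chunks the cleaned list by scanning ahead to the
-- next '0 '-header, instead of A's single stateful loop with a current buffer and flush.

-- ===== PORT A =====
-- one iteration of A's for-loop over (records, current)
def pvStepA (st : List (List String) × List String) (line : String) :
    List (List String) × List String :=
  let l := PySem.Str.strip line
  if l = "" then st
  else if PySem.Str.startswith l "0 " then
    ((if st.2 = [] then st.1 else st.1 ++ [st.2]), [l])
  else (st.1, st.2 ++ [l])

def split_records_py (lines : List String) : List (List String) :=
  let p := lines.foldl pvStepA ([], [])
  if p.2 = [] then p.1 else p.1 ++ [p.2]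

-- ===== PORT B =====
-- not tail[k].startswith("0 ")
def pvP (s : String) : Bool := !(PySem.Str.startswith s "0 ")

-- B's outer while-loop over 'rest'; the inner while computing k is takeWhile/dropWhile
def pvChunks : List String → List (List String)
  | [] => []
  | h :: t => (h :: t.takeWhile pvP) :: pvChunks (t.dropWhile pvP)
  termination_by xs => xs.length
  decreasing_by
    exact Nat.lt_succ_of_le (t.length_dropWhile_le pvP)

def split_records_py_alt (lines : List String) : List (List String) :=
  pvChunks ((lines.map PySem.Str.strip).filter (fun s => s ≠ ""))

-- ===== PRECONDITION & SPEC =====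
def Spec_split_records_py (lines : List String) (out : List (List String)) : Prop := out = split_records_py_alt lines
instance (lines : List String) (out : List (List String)) : Decidable (Spec_split_records_py lines out) := by unfold Spec_split_records_py; infer_instance

-- ===== CLAIM (what is proved, stated in full; the proofs are below) =====
def Claim_equal_split_records_py : Prop := ∀ (lines : List String), Dom_split_records_py lines → Spec_split_records_py lines (split_records_py lines)

-- ===== LEMMAS AND PROOFS =====
-- A's final 'if current: records.append(current)'
def pvFlush (p : List (List String) × List String) : List (List String) :=
  if p.2 = [] then p.1 else p.1 ++ [p.2]

-- what the rest of A's loop produces from a (possibly empty) current buffer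
def pvBody (cur : List String) (xs : List String) : List (List String) :=
  if cur = [] then pvChunks xs
  else (cur ++ xs.takeWhile pvP) :: pvChunks (xs.dropWhile pvP)

lemma pvBody_single (s : String) (xs : List String) :
    pvBody [s] xs = pvChunks (s :: xs) := by
  simp [pvBody, pvChunks]

lemma pvMain : ∀ (lines : List String) (recs : List (List String)) (cur : List String),
    pvFlush (lines.foldl pvStepA (recs, cur)) =
      recs ++ pvBody cur ((lines.map PySem.Str.strip).filter (fun s => !decide (s = ""))) := by
  intro lines
  induction lines with
  | nil =>
      intro recs cur
      by_cases h : cur = [] <;> simp [pvFlush, pvBody, h, pvChunks]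
  | cons l ls ih =>
      intro recs cur
      simp only [List.foldl_cons, List.map_cons, List.filter_cons]
      by_cases hs : PySem.Str.strip l = ""
      · simp [pvStepA, hs]
        exact ih recs cur
      · simp only [show (!decide (PySem.Str.strip l = "")) = true from by simp [hs], if_true]
        by_cases h0 : PySem.Chars.startswith (PySem.Chars.strip l.toList) ['0', ' '] = true
        · by_cases hc : cur = []
          · simp [pvStepA, hs, h0, hc]
            rw [ih, pvBody_single, pvBody, if_pos rfl]
          · simp [pvStepA, hs, h0, hc]
            rw [ih, pvBody_single]
            have hP : pvP (PySem.Str.strip l) = false := by simp [pvP, h0]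
            simp [pvBody, hc, hP, pvChunks]
        · by_cases hc : cur = []
          · simp [pvStepA, hs, h0, hc]
            rw [ih, pvBody_single, pvBody, if_pos rfl]
          · simp [pvStepA, hs, h0]
            rw [ih]
            have hP : pvP (PySem.Str.strip l) = true := by simp [pvP, h0]
            have hcc : cur ++ [PySem.Str.strip l] ≠ [] := by simp
            simp [pvBody, hc, hcc, hP]

-- ===== VERDICT (by name: the statement is the Claim_ definition above) =====
theorem split_records_py_spec : Claim_equal_split_records_py := by
  intro lines _
  show split_records_py lines = split_records_py_alt lines
  have h := pvMain lines [] []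
  simpa [split_records_py, split_records_py_alt, pvFlush, pvBody] using h
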